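-- pv_equiv track=rewrite | github.com/every-algorithm/python | machine-learning/junction_tree_algorithm.py | build_sepsets
-- ===== SOURCE A (Python) =====
-- def build_sepsets(cliques):
--     """
--     Build separators between cliques using maximum cardinality search.
--     """
--     sepsets = {}
--     for i, ci in enumerate(cliques):
--         for j, cj in enumerate(cliques):
--             if i < j:
--                 sep = ci & cj
--                 if sep:
--                     sepsets[(i, j)] = sep
--     return sepsets
-- ===== SOURCE B (Python) =====
-- def build_sepsets(cliques):
--     """
--     Build separators between cliques via an inverted index element -> clique
--     indices: only clique pairs that actually share an element are touched.
--     """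
--     index = {}
--     for i, ci in enumerate(cliques):
--         for x in ci:
--             index.setdefault(x, []).append(i)
--     sepsets = {}
--     for i, ci in enumerate(cliques):
--         partners = set()
--         for x in ci:
--             for j in index[x]:
--                 if i < j:
--                     partners.add(j)
--         for j in sorted(partners):
--             sepsets[(i, j)] = ci & cliques[j]
--     return sepsets
-- ===== Notes on version B (the rewrite author's own statement) =====
-- stated objective: alternative
-- what changed: Replaces the all-pairs double loop over clique indices with an inverted index element -> clique indices: for each clique only the cliques it actually shares an element with are collected (sorted to keep A's (i,j) order) and then intersected, so disjoint pairs are never examined; it trades the pairwise scan for building the index.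
import Mathlib
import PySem

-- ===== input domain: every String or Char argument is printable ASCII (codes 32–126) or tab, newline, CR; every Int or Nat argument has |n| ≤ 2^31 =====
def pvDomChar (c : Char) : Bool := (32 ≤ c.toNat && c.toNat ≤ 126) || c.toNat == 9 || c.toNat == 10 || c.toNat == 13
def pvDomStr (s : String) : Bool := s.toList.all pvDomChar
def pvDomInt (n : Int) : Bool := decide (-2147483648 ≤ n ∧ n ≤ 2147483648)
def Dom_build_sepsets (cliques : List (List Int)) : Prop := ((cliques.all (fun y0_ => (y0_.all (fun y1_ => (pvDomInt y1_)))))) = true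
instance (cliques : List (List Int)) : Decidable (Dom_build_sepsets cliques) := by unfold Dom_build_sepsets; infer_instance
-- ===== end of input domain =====

-- B replaces A's all-pairs scan by an inverted index element -> clique indices, touching
-- only co-occurring clique pairs (objective: alternative). Equivalence is about the return value.
-- Inner lists represent Python sets; the keys (i, j) of the result dict are pairwise
-- distinct and inserted in increasing order, so the dict is the append-only list of triples.

-- ===== PORT A =====
def build_sepsets (cliques : List (List Int)) : List (Int × Int × List Int) :=
  (PySem.List.enumerate cliques).foldl (fun sepsets p =>
    (PySem.List.enumerate cliques).foldl (fun acc q =>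
      if p.1 < q.1 then
        let sep := PySem.Set.inter p.2 q.2
        if sep ≠ [] then acc ++ [(p.1, q.1, sep)] else acc
      else acc) sepsets) []

-- ===== PORT B =====
-- index.setdefault(x, []).append(i) is index[x] = index.get(x, []) + [i], i.e. Dict.modify.
def build_sepsets_alt (cliques : List (List Int)) : List (Int × Int × List Int) :=
  let index : PySem.Dict Int (List Int) :=
    (PySem.List.enumerate cliques).foldl (fun d p =>
      p.2.foldl (fun d x => d.modify x [] (fun l => l ++ [p.1])) d) PySem.Dict.empty
  (PySem.List.enumerate cliques).foldl (fun sepsets p =>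
    let partners : PySem.Set Int :=
      p.2.foldl (fun s x =>
        (index.getD x []).foldl (fun s j => if p.1 < j then PySem.Set.add s j else s) s)
        PySem.Set.empty
    (PySem.List.sorted partners (fun j => j)).foldl (fun sepsets j =>
      sepsets ++ [(p.1, j, PySem.Set.inter p.2 (PySem.List.pyGetD cliques j []))]) sepsets) []

-- ===== PRECONDITION & SPEC =====
def Spec_build_sepsets (cliques : List (List Int)) (out : List (Int × Int × List Int)) : Prop := out = build_sepsets_alt cliques
instance (cliques : List (List Int)) (out : List (Int × Int × List Int)) : Decidable (Spec_build_sepsets cliques out) := by unfold Spec_build_sepsets; infer_instance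

-- ===== CLAIM (what is proved, stated in full; the proofs are below) =====
def Claim_equal_build_sepsets : Prop := ∀ (cliques : List (List Int)), Dom_build_sepsets cliques → Spec_build_sepsets cliques (build_sepsets cliques)

-- ===== LEMMAS AND PROOFS =====

-- Proof-only abbreviations for B's internals and A's per-clique block.
def pvIndex (cliques : List (List Int)) : PySem.Dict Int (List Int) :=
  (PySem.List.enumerate cliques).foldl (fun d p =>
    p.2.foldl (fun d x => d.modify x [] (fun l => l ++ [p.1])) d) PySem.Dict.empty

def pvPartners (cliques : List (List Int)) (p : Int × List Int) : PySem.Set Int :=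
  p.2.foldl (fun s x =>
    ((pvIndex cliques).getD x []).foldl (fun s j => if p.1 < j then PySem.Set.add s j else s) s)
    PySem.Set.empty

def pvBlockA (cliques : List (List Int)) (p : Int × List Int) : List (Int × Int × List Int) :=
  ((PySem.List.enumerate cliques).filter
      (fun q => decide (p.1 < q.1 ∧ PySem.Set.inter p.2 q.2 ≠ []))).map
    (fun q => (p.1, q.1, PySem.Set.inter p.2 q.2))

-- A in flatMap normal form.
lemma pvA_flat (cliques : List (List Int)) : build_sepsets cliques =
    (PySem.List.enumerate cliques).flatMap (pvBlockA cliques) := by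
  show List.foldl (fun sepsets p =>
      List.foldl (fun acc q =>
        if p.1 < q.1 then
          (if PySem.Set.inter p.2 q.2 ≠ [] then acc ++ [(p.1, q.1, PySem.Set.inter p.2 q.2)]
           else acc)
        else acc) sepsets (PySem.List.enumerate cliques)) [] (PySem.List.enumerate cliques) = _
  rw [PySem.List.foldl_congr_mem (PySem.List.enumerate cliques)
      (fun sepsets p =>
        List.foldl (fun acc q =>
          if p.1 < q.1 then
            (if PySem.Set.inter p.2 q.2 ≠ [] then acc ++ [(p.1, q.1, PySem.Set.inter p.2 q.2)]
             else acc)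
          else acc) sepsets (PySem.List.enumerate cliques))
      (fun sepsets p => sepsets ++ pvBlockA cliques p) []
      (by
        intro acc p _
        dsimp only
        rw [PySem.List.foldl_congr_mem (PySem.List.enumerate cliques)
            (fun acc q =>
              if p.1 < q.1 then
                (if PySem.Set.inter p.2 q.2 ≠ [] then acc ++ [(p.1, q.1, PySem.Set.inter p.2 q.2)]
                 else acc)
              else acc)
            (fun acc q => if p.1 < q.1 ∧ PySem.Set.inter p.2 q.2 ≠ [] then
                acc ++ [(p.1, q.1, PySem.Set.inter p.2 q.2)] else acc) acc
            (by
              intro acc q _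
              by_cases h1 : p.1 < q.1 <;> by_cases h2 : PySem.Set.inter p.2 q.2 ≠ [] <;>
                simp [h1, h2])]
        exact PySem.List.foldl_append_ite _ _ _ _)]
  simpa using PySem.List.foldl_append_eq_flatMap (pvBlockA cliques) (PySem.List.enumerate cliques) []

-- B in flatMap normal form.
lemma pvB_flat (cliques : List (List Int)) : build_sepsets_alt cliques =
    (PySem.List.enumerate cliques).flatMap (fun p =>
      (PySem.List.sorted (pvPartners cliques p) (fun j => j)).map
        (fun j => (p.1, j, PySem.Set.inter p.2 (PySem.List.pyGetD cliques j [])))) := by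
  show List.foldl (fun sepsets p =>
      List.foldl (fun sepsets j =>
        sepsets ++ [(p.1, j, PySem.Set.inter p.2 (PySem.List.pyGetD cliques j []))]) sepsets
        (PySem.List.sorted (pvPartners cliques p) (fun j => j))) [] (PySem.List.enumerate cliques) = _
  rw [PySem.List.foldl_congr_mem (PySem.List.enumerate cliques)
      (fun sepsets p =>
        List.foldl (fun sepsets j =>
          sepsets ++ [(p.1, j, PySem.Set.inter p.2 (PySem.List.pyGetD cliques j []))]) sepsets
          (PySem.List.sorted (pvPartners cliques p) (fun j => j)))
      (fun sepsets p => sepsets ++ (PySem.List.sorted (pvPartners cliques p) (fun j => j)).map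
        (fun j => (p.1, j, PySem.Set.inter p.2 (PySem.List.pyGetD cliques j [])))) []
      (by
        intro acc p _
        dsimp only
        exact PySem.List.foldl_append_singleton_eq_map _ _ _)]
  simpa using PySem.List.foldl_append_eq_flatMap
    (fun p => (PySem.List.sorted (pvPartners cliques p) (fun j => j)).map
      (fun j => (p.1, j, PySem.Set.inter p.2 (PySem.List.pyGetD cliques j []))))
    (PySem.List.enumerate cliques) []

-- Membership in the inverted index.
lemma pv_mem_inner_fold (c : List Int) (i : Int) (d : PySem.Dict Int (List Int)) (y j : Int) :
    j ∈ (c.foldl (fun d x => d.modify x [] (fun l => l ++ [i])) d).getD y []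
      ↔ j ∈ d.getD y [] ∨ (y ∈ c ∧ j = i) := by
  induction c generalizing d with
  | nil => simp
  | cons a c ih =>
    rw [List.foldl_cons, ih]
    by_cases h : y = a
    · subst h
      simp [PySem.Dict.modify, PySem.Dict.getD_insert_self]
      tauto
    · simp [PySem.Dict.modify, PySem.Dict.getD_insert, h]

lemma pv_mem_index (cliques : List (List Int)) (y j : Int) :
    j ∈ (pvIndex cliques).getD y []
      ↔ ∃ p ∈ PySem.List.enumerate cliques, j = p.1 ∧ y ∈ p.2 := by
  unfold pvIndex
  have h : ∀ (l : List (Int × List Int)) (d : PySem.Dict Int (List Int)),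
      j ∈ (l.foldl (fun d p => p.2.foldl (fun d x => d.modify x [] (fun l => l ++ [p.1])) d) d).getD y []
        ↔ j ∈ d.getD y [] ∨ ∃ p ∈ l, j = p.1 ∧ y ∈ p.2 := by
    intro l
    induction l with
    | nil => simp
    | cons a l ih => intro d; simp [ih, pv_mem_inner_fold]; tauto
  simp [h]

-- Membership and nodup for the partner set.
lemma pv_mem_add_fold (l : List Int) (k : Int) (s : PySem.Set Int) (j : Int) :
    j ∈ l.foldl (fun s j' => if k < j' then PySem.Set.add s j' else s) s
      ↔ j ∈ s ∨ (j ∈ l ∧ k < j) := by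
  induction l generalizing s with
  | nil => simp
  | cons a l ih =>
    rw [List.foldl_cons]
    by_cases h : k < a
    · simp only [h, if_pos, ih, PySem.Set.mem_add, List.mem_cons]
      constructor
      · rintro ((hs | rfl) | ⟨hl, hk⟩)
        · tauto
        · exact Or.inr ⟨Or.inl rfl, h⟩
        · tauto
      · rintro (hs | ⟨(rfl | hl), hk⟩) <;> tauto
    · simp only [h, if_neg, not_false_iff, ih, List.mem_cons]
      constructor
      · rintro (hs | ⟨hl, hk⟩) <;> tauto
      · rintro (hs | ⟨(rfl | hl), hk⟩)
        · tauto
        · exact absurd hk h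
        · tauto

lemma pv_nodup_add_fold (l : List Int) (k : Int) (s : PySem.Set Int) (h : s.Nodup) :
    (l.foldl (fun s j' => if k < j' then PySem.Set.add s j' else s) s).Nodup := by
  induction l generalizing s with
  | nil => exact h
  | cons a l ih =>
    rw [List.foldl_cons]
    by_cases hk : k < a
    · simp only [hk, if_pos]; exact ih _ (PySem.Set.nodup_add s a h)
    · simp only [hk, if_neg, not_false_iff]; exact ih _ h

lemma pv_mem_partners (cliques : List (List Int)) (p : Int × List Int) (j : Int) :
    j ∈ pvPartners cliques p
      ↔ ∃ x ∈ p.2, j ∈ (pvIndex cliques).getD x [] ∧ p.1 < j := by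
  unfold pvPartners
  have h : ∀ (c : List Int) (s : PySem.Set Int),
      j ∈ c.foldl (fun s x =>
        ((pvIndex cliques).getD x []).foldl (fun s j' => if p.1 < j' then PySem.Set.add s j' else s) s) s
        ↔ j ∈ s ∨ ∃ x ∈ c, j ∈ (pvIndex cliques).getD x [] ∧ p.1 < j := by
    intro c
    induction c with
    | nil => simp
    | cons a c ih => intro s; simp [ih, pv_mem_add_fold]; tauto
  simp [h]

lemma pv_nodup_partners (cliques : List (List Int)) (p : Int × List Int) :
    (pvPartners cliques p).Nodup := by
  unfold pvPartners
  have h : ∀ (c : List Int) (s : PySem.Set Int), s.Nodup →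
      (c.foldl (fun s x =>
        ((pvIndex cliques).getD x []).foldl (fun s j' => if p.1 < j' then PySem.Set.add s j' else s) s) s).Nodup := by
    intro c
    induction c with
    | nil => exact fun s h => h
    | cons a c ih => intro s hs; exact ih _ (pv_nodup_add_fold _ _ _ hs)
  exact h _ _ List.nodup_nil

-- Nonempty intersection is co-occurrence.
lemma pv_inter_ne_nil (a b : List Int) :
    PySem.Set.inter a b ≠ [] ↔ ∃ x ∈ a, x ∈ b := by
  simp [PySem.Set.inter, List.filter_eq_nil_iff]

-- The sorted partner list of p is exactly A's filtered index list.
lemma pv_sorted_partners (cliques : List (List Int)) (p : Int × List Int) :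
    PySem.List.sorted (pvPartners cliques p) (fun j => j)
      = ((PySem.List.enumerate cliques).filter
          (fun q => decide (p.1 < q.1 ∧ PySem.Set.inter p.2 q.2 ≠ []))).map (fun q => q.1) := by
  have hS : (((PySem.List.enumerate cliques).filter
      (fun q => decide (p.1 < q.1 ∧ PySem.Set.inter p.2 q.2 ≠ []))).map (fun q => q.1)).Pairwise (· < ·) :=
    List.pairwise_map.2 ((PySem.List.pairwise_lt_enumerate cliques 0).filter _)
  apply PySem.List.sorted_eq_of_perm_of_pairwise_lt
  · refine (List.perm_ext_iff_of_nodup (hS.imp ne_of_lt) (pv_nodup_partners cliques p)).2 ?_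
    intro j
    simp only [List.mem_map, List.mem_filter, decide_eq_true_eq, pv_mem_partners, pv_mem_index,
      pv_inter_ne_nil]
    constructor
    · rintro ⟨q, ⟨hq, hlt, x, hx, hxq⟩, rfl⟩
      exact ⟨x, hx, ⟨q, hq, rfl, hxq⟩, hlt⟩
    · rintro ⟨x, hx, ⟨q, hq, rfl, hxq⟩, hlt⟩
      exact ⟨q, ⟨hq, hlt, x, hx, hxq⟩, rfl⟩
  · exact hS

-- Indexing back into cliques returns the enumerated clique.
lemma pv_pyGetD_enum (cliques : List (List Int)) (q : Int × List Int)
    (hq : q ∈ PySem.List.enumerate cliques) :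
    PySem.List.pyGetD cliques q.1 [] = q.2 := by
  rcases (PySem.List.mem_enumerate_iff cliques 0 q).1 hq with ⟨k, hk, rfl⟩
  simp [PySem.List.pyGetD_natCast, List.getD, hk]

-- ===== VERDICT (by name: the statement is the Claim_ definition above) =====
theorem build_sepsets_spec : Claim_equal_build_sepsets := by
  intro cliques _
  unfold Spec_build_sepsets
  rw [pvA_flat, pvB_flat]
  apply List.flatMap_congr
  intro p hp
  rw [pv_sorted_partners, List.map_map]
  unfold pvBlockA
  apply List.map_congr_left
  intro q hq
  have h2 : PySem.List.pyGetD cliques q.1 [] = q.2 :=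
    pv_pyGetD_enum cliques q (List.mem_of_mem_filter hq)
  simp [Function.comp, h2]
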